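-- pv_equiv track=rewrite | github.com/vrthra/walkthrough-verifier | app.py | _auto_color
-- ===== SOURCE A (Python) =====
-- def _auto_color(action: str, data: str) -> str:
--     """
--     Heuristic display colour for a triage step based on clinical urgency.
--     Returns a CSS hex colour string.
--     """
--     d = (data   or "").upper()
--     a = (action or "").upper()
--
--     # Red — serious / abnormal values
--     if any(k in d for k in ("HIGH", "ABNORMAL", "CRITICAL", "URGENT",
--                              "SEVERE", "ELEVATED", "ALERT", "EMERGENCY")):
--         return "#dc3545"
--
--     # Green — within-normal / safe results
--     if any(k in d for k in ("NORMAL", "OK", "CLEAR", "STABLE", "NEGATIVE")):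
--         return "#198754"
--
--     # Orange — routing to higher acuity or pending investigations
--     if any(k in d for k in ("ICU", "REQUESTED", "SPECIALIST")):
--         return "#fd7e14"
--
--     # Blue — lifecycle: entry / exit / discharge home
--     if any(k in d for k in ("ENTRY", "EXIT", "HOME")) or \
--        any(k in a for k in ("ENTRY", "EXIT", "DISCHARGE")):
--         return "#0d6efd"
--
--     # Teal — ward admission (intermediate acuity)
--     if "WARD" in d:
--         return "#0dcaf0"
--
--     return "#6c757d"  # neutral grey
-- ===== SOURCE B (Python) =====
-- # Different strategy: instead of an ordered first-match rule chain, flatten all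
-- # (keyword, field, urgency-rank) triples into one table, do a SINGLE pass that
-- # aggregates the MINIMUM rank over ALL matches (no early return), then index a
-- # colour tuple.  Correct because the chain's rule order coincides with the rank
-- # order, so "first matching rule" = "minimum matched rank".
-- _COLORS = ("#dc3545", "#198754", "#fd7e14", "#0d6efd", "#0dcaf0")
--
-- _FLAT = [
--     ("HIGH", True, 0), ("ABNORMAL", True, 0), ("CRITICAL", True, 0),
--     ("URGENT", True, 0), ("SEVERE", True, 0), ("ELEVATED", True, 0),
--     ("ALERT", True, 0), ("EMERGENCY", True, 0),
--     ("NORMAL", True, 1), ("OK", True, 1), ("CLEAR", True, 1),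
--     ("STABLE", True, 1), ("NEGATIVE", True, 1),
--     ("ICU", True, 2), ("REQUESTED", True, 2), ("SPECIALIST", True, 2),
--     ("ENTRY", True, 3), ("EXIT", True, 3), ("HOME", True, 3),
--     ("ENTRY", False, 3), ("EXIT", False, 3), ("DISCHARGE", False, 3),
--     ("WARD", True, 4),
-- ]
--
-- def _auto_color(action: str, data: str) -> str:
--     d = (data or "").upper()
--     a = (action or "").upper()
--     best = None
--     for kw, in_data, rank in _FLAT:
--         if kw in (d if in_data else a):
--             best = rank if best is None else min(best, rank)
--     return _COLORS[best] if best is not None else "#6c757d"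
-- ===== Notes on version B (the rewrite author's own statement) =====
-- stated objective: alternative
-- what changed: Replaces the early-return if-chain of per-rule any() checks by a flat (keyword, field, rank) table scanned in one full pass that aggregates the minimum matched urgency rank, then indexes a colour tuple; correct because rule order equals rank order, so first match = minimum rank.
import Mathlib
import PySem

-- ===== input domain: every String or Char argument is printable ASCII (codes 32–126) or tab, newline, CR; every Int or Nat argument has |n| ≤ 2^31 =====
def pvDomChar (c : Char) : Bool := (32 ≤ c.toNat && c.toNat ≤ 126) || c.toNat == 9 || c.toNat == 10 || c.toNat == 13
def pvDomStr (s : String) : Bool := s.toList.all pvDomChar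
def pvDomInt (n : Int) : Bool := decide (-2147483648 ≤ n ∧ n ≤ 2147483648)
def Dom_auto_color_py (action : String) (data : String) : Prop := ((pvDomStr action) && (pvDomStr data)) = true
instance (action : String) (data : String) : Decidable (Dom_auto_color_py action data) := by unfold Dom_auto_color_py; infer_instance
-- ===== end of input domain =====

-- B replaces A's early-return if-chain by one full pass over a flat (keyword, field, rank) table aggregating the minimum matched rank (objective: alternative algorithm, same cost).


-- ===== PORT A =====
def auto_color_py (action : String) (data : String) : String :=
  let d := PySem.Str.upper (if data == "" then "" else data)
  let a := PySem.Str.upper (if action == "" then "" else action)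
  if ["HIGH", "ABNORMAL", "CRITICAL", "URGENT", "SEVERE", "ELEVATED", "ALERT",
      "EMERGENCY"].any (fun k => PySem.Str.isIn k d) then "#dc3545"
  else if ["NORMAL", "OK", "CLEAR", "STABLE", "NEGATIVE"].any
      (fun k => PySem.Str.isIn k d) then "#198754"
  else if ["ICU", "REQUESTED", "SPECIALIST"].any (fun k => PySem.Str.isIn k d) then "#fd7e14"
  else if (["ENTRY", "EXIT", "HOME"].any (fun k => PySem.Str.isIn k d)) ||
          (["ENTRY", "EXIT", "DISCHARGE"].any (fun k => PySem.Str.isIn k a)) then "#0d6efd"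
  else if PySem.Str.isIn "WARD" d then "#0dcaf0"
  else "#6c757d"

-- ===== PORT B =====
def pvColors : List String := ["#dc3545", "#198754", "#fd7e14", "#0d6efd", "#0dcaf0"]

-- flat (keyword, taken-from-data?, rank) table of Source B
def pvFlat : List (String × Bool × Nat) :=
  [("HIGH", true, 0), ("ABNORMAL", true, 0), ("CRITICAL", true, 0),
   ("URGENT", true, 0), ("SEVERE", true, 0), ("ELEVATED", true, 0),
   ("ALERT", true, 0), ("EMERGENCY", true, 0),
   ("NORMAL", true, 1), ("OK", true, 1), ("CLEAR", true, 1),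
   ("STABLE", true, 1), ("NEGATIVE", true, 1),
   ("ICU", true, 2), ("REQUESTED", true, 2), ("SPECIALIST", true, 2),
   ("ENTRY", true, 3), ("EXIT", true, 3), ("HOME", true, 3),
   ("ENTRY", false, 3), ("EXIT", false, 3), ("DISCHARGE", false, 3),
   ("WARD", true, 4)]

-- `kw in (d if in_data else a)` of Source B
def pvCond (d a : String) (t : String × Bool × Nat) : Bool :=
  PySem.Str.isIn t.1 (if t.2.1 then d else a)

-- the loop body of Source B: best = rank if best is None else min(best, rank)
def pvStep (d a : String) (best : Option Nat) (t : String × Bool × Nat) : Option Nat :=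
  if pvCond d a t then
    match best with
    | none => some t.2.2
    | some b => some (min b t.2.2)
  else best

def auto_color_py_alt (action : String) (data : String) : String :=
  let d := PySem.Str.upper (if data == "" then "" else data)
  let a := PySem.Str.upper (if action == "" then "" else action)
  match pvFlat.foldl (pvStep d a) none with
  | some r => pvColors.getD r "#6c757d"   -- _COLORS[best]; ranks are always in range
  | none => "#6c757d"

-- ===== PRECONDITION & SPEC =====
def Spec_auto_color_py (action : String) (data : String) (out : String) : Prop := out = auto_color_py_alt action data
instance (action : String) (data : String) (out : String) : Decidable (Spec_auto_color_py action data out) := by unfold Spec_auto_color_py; infer_instance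

-- ===== CLAIM (what is proved, stated in full; the proofs are below) =====
def Claim_equal_auto_color_py : Prop := ∀ (action : String) (data : String), Dom_auto_color_py action data → Spec_auto_color_py action data (auto_color_py action data)

-- ===== LEMMAS AND PROOFS =====

-- rank-order segments of pvFlat
def pvSeg0 : List (String × Bool × Nat) :=
  [("HIGH", true, 0), ("ABNORMAL", true, 0), ("CRITICAL", true, 0),
   ("URGENT", true, 0), ("SEVERE", true, 0), ("ELEVATED", true, 0),
   ("ALERT", true, 0), ("EMERGENCY", true, 0)]
def pvSeg1 : List (String × Bool × Nat) :=
  [("NORMAL", true, 1), ("OK", true, 1), ("CLEAR", true, 1),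
   ("STABLE", true, 1), ("NEGATIVE", true, 1)]
def pvSeg2 : List (String × Bool × Nat) :=
  [("ICU", true, 2), ("REQUESTED", true, 2), ("SPECIALIST", true, 2)]
def pvSeg3 : List (String × Bool × Nat) :=
  [("ENTRY", true, 3), ("EXIT", true, 3), ("HOME", true, 3),
   ("ENTRY", false, 3), ("EXIT", false, 3), ("DISCHARGE", false, 3)]
def pvSeg4 : List (String × Bool × Nat) := [("WARD", true, 4)]

theorem pvFlat_split : pvFlat = pvSeg0 ++ (pvSeg1 ++ (pvSeg2 ++ (pvSeg3 ++ (pvSeg4 ++ [])))) := by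
  simp [pvFlat, pvSeg0, pvSeg1, pvSeg2, pvSeg3, pvSeg4]

-- once the accumulator holds k and every later rank is ≥ k, the min-fold is stuck at k
theorem pv_absorb (d a : String) (k : Nat) (l : List (String × Bool × Nat))
    (h : ∀ t ∈ l, k ≤ t.2.2) :
    l.foldl (pvStep d a) (some k) = some k := by
  induction l with
  | nil => rfl
  | cons t l ih =>
      have hk : k ≤ t.2.2 := h t (by simp)
      have : pvStep d a (some k) t = some k := by
        unfold pvStep
        split
        · simp [Nat.min_eq_left hk]
        · rfl
      simp only [List.foldl_cons, this]
      exact ih (fun t ht => h t (by simp [ht]))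

-- a segment with no match is skipped
theorem pv_skip (d a : String) (s rest : List (String × Bool × Nat)) (init : Option Nat)
    (h : ∀ t ∈ s, pvCond d a t = false) :
    (s ++ rest).foldl (pvStep d a) init = rest.foldl (pvStep d a) init := by
  induction s generalizing init with
  | nil => rfl
  | cons t s ih =>
      have ht : pvCond d a t = false := h t (by simp)
      simp only [List.cons_append, List.foldl_cons, pvStep, ht, Bool.false_eq_true, if_false]
      exact ih init (fun t ht => h t (by simp [ht]))

-- a matching segment whose ranks all equal k, followed only by ranks ≥ k, yields some k
theorem pv_hit (d a : String) (k : Nat) (s rest : List (String × Bool × Nat))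
    (hany : s.any (pvCond d a) = true)
    (hk : ∀ t ∈ s, t.2.2 = k)
    (hge : ∀ t ∈ rest, k ≤ t.2.2) :
    (s ++ rest).foldl (pvStep d a) none = some k := by
  induction s with
  | nil => simp at hany
  | cons t s ih =>
      by_cases ht : pvCond d a t = true
      · have htk : t.2.2 = k := hk t (by simp)
        have : pvStep d a none t = some k := by simp [pvStep, ht, htk]
        simp only [List.cons_append, List.foldl_cons, this]
        refine pv_absorb d a k _ (fun u hu => ?_)
        rcases List.mem_append.mp hu with h1 | h2
        · exact (hk u (by simp [h1])).ge
        · exact hge u h2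
      · have ht' : pvCond d a t = false := by simpa using ht
        have : pvStep d a none t = none := by simp [pvStep, ht']
        simp only [List.cons_append, List.foldl_cons, this]
        refine ih ?_ (fun u hu => hk u (by simp [hu]))
        simpa [ht'] using hany

-- A's rule-level conditions expressed on the segments
theorem pv_any0 (d a : String) : pvSeg0.any (pvCond d a) =
    (["HIGH", "ABNORMAL", "CRITICAL", "URGENT", "SEVERE", "ELEVATED", "ALERT",
      "EMERGENCY"] : List String).any (fun k => PySem.Str.isIn k d) := rfl
theorem pv_any1 (d a : String) : pvSeg1.any (pvCond d a) =
    (["NORMAL", "OK", "CLEAR", "STABLE", "NEGATIVE"] : List String).any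
      (fun k => PySem.Str.isIn k d) := rfl
theorem pv_any2 (d a : String) : pvSeg2.any (pvCond d a) =
    (["ICU", "REQUESTED", "SPECIALIST"] : List String).any (fun k => PySem.Str.isIn k d) := rfl
theorem pv_any3 (d a : String) : pvSeg3.any (pvCond d a) =
    ((["ENTRY", "EXIT", "HOME"] : List String).any (fun k => PySem.Str.isIn k d) ||
     (["ENTRY", "EXIT", "DISCHARGE"] : List String).any (fun k => PySem.Str.isIn k a)) := by
  simp [pvSeg3, pvCond, List.any_cons, List.any_nil, Bool.or_assoc]
theorem pv_any4 (d a : String) : pvSeg4.any (pvCond d a) = PySem.Str.isIn "WARD" d := by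
  simp [pvSeg4, pvCond]

theorem pv_false_of_any_false {d a : String} {s : List (String × Bool × Nat)}
    (h : s.any (pvCond d a) = false) : ∀ t ∈ s, pvCond d a t = false := by
  simpa [List.any_eq_false] using h

-- ===== VERDICT (by name: the statement is the Claim_ definition above) =====
theorem auto_color_py_spec : Claim_equal_auto_color_py := by
  intro action data _
  unfold Spec_auto_color_py auto_color_py auto_color_py_alt
  set d := PySem.Str.upper (if data == "" then "" else data) with hd
  set a := PySem.Str.upper (if action == "" then "" else action) with ha
  dsimp only
  rw [pvFlat_split]
  by_cases h0 : pvSeg0.any (pvCond d a) = true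
  · rw [pv_hit d a 0 _ _ h0 (by decide) (by decide)]
    rw [← pv_any0 d a, h0]
    rfl
  · have h0' := pv_false_of_any_false (by simpa using h0)
    rw [pv_skip d a _ _ _ h0', ← pv_any0 d a]
    rw [Bool.eq_false_iff.mpr h0]
    simp only [Bool.false_eq_true, if_false]
    by_cases h1 : pvSeg1.any (pvCond d a) = true
    · rw [pv_hit d a 1 _ _ h1 (by decide) (by decide)]
      rw [← pv_any1 d a, h1]
      rfl
    · have h1' := pv_false_of_any_false (by simpa using h1)
      rw [pv_skip d a _ _ _ h1', ← pv_any1 d a]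
      rw [Bool.eq_false_iff.mpr h1]
      simp only [Bool.false_eq_true, if_false]
      by_cases h2 : pvSeg2.any (pvCond d a) = true
      · rw [pv_hit d a 2 _ _ h2 (by decide) (by decide)]
        rw [← pv_any2 d a, h2]
        rfl
      · have h2' := pv_false_of_any_false (by simpa using h2)
        rw [pv_skip d a _ _ _ h2', ← pv_any2 d a]
        rw [Bool.eq_false_iff.mpr h2]
        simp only [Bool.false_eq_true, if_false]
        by_cases h3 : pvSeg3.any (pvCond d a) = true
        · rw [pv_hit d a 3 _ _ h3 (by decide) (by decide)]
          rw [← pv_any3 d a, h3]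
          rfl
        · have h3' := pv_false_of_any_false (by simpa using h3)
          rw [pv_skip d a _ _ _ h3', ← pv_any3 d a]
          rw [Bool.eq_false_iff.mpr h3]
          simp only [Bool.false_eq_true, if_false]
          by_cases h4 : pvSeg4.any (pvCond d a) = true
          · rw [pv_hit d a 4 _ _ h4 (by decide) (by decide)]
            rw [← pv_any4 d a, h4]
            rfl
          · have h4' := pv_false_of_any_false (by simpa using h4)
            rw [pv_skip d a _ _ _ h4', ← pv_any4 d a]
            rw [Bool.eq_false_iff.mpr h4]
            simp only [Bool.false_eq_true, if_false, List.foldl_nil]
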